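-- pv_equiv track=rewrite | github.com/loofitheboss/loofi-fedora-tweaks | loofi-fedora-tweaks/utils/voice.py | get_recommended_model
-- ===== SOURCE A (Python) =====
-- from typing import Any, Optional
--
-- WHISPER_MODELS: dict[str, dict[str, Any]] = {
--     "tiny": {
--         "name": "Tiny",
--         "size_mb": 75,
--         "ram_required": 400,
--         "description": "Fastest, lowest accuracy",
--     },
--     "base": {
--         "name": "Base",
--         "size_mb": 142,
--         "ram_required": 500,
--         "description": "Good balance of speed and accuracy",
--     },
--     "small": {
--         "name": "Small",
--         "size_mb": 466,
--         "ram_required": 1000,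
--         "description": "Better accuracy, moderate speed",
--     },
--     "medium": {
--         "name": "Medium",
--         "size_mb": 1500,
--         "ram_required": 2600,
--         "description": "High accuracy, slower",
--     },
-- }
--
-- def get_recommended_model(available_ram_mb: int) -> str:
--     """
--     Recommend the best whisper model for available RAM.
--
--     Args:
--         available_ram_mb: Available RAM in megabytes.
--
--     Returns:
--         Model name string (e.g. "base"). Returns "tiny" if RAM is very low.
--     """
--     # Sort by ram_required descending to pick the most capable that fits
--     candidates = sorted(
--         WHISPER_MODELS.items(),
--         key=lambda item: int(item[1]["ram_required"]),
--         reverse=True,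
--     )
--
--     for model_name, info in candidates:
--         if int(info["ram_required"]) <= available_ram_mb:
--             return model_name
--
--     # Fallback to the smallest model
--     return "tiny"
-- ===== SOURCE B (Python) =====
-- def get_recommended_model(available_ram_mb: int) -> str:
--     # Closed-form decision chain over the (fixed) model RAM thresholds,
--     # from the most capable down; "tiny" is the fallback.
--     if available_ram_mb >= 2600:
--         return "medium"
--     if available_ram_mb >= 1000:
--         return "small"
--     if available_ram_mb >= 500:
--         return "base"
--     return "tiny"
-- ===== Notes on version B (the rewrite author's own statement) =====
-- stated objective: simpler
-- what changed: Replaced the sort-by-ram-descending-then-scan over the model dict with a closed-form descending threshold if-chain (2600/1000/500) with 'tiny' as fallback; no dict traversal or sort at all.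
import Mathlib
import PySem

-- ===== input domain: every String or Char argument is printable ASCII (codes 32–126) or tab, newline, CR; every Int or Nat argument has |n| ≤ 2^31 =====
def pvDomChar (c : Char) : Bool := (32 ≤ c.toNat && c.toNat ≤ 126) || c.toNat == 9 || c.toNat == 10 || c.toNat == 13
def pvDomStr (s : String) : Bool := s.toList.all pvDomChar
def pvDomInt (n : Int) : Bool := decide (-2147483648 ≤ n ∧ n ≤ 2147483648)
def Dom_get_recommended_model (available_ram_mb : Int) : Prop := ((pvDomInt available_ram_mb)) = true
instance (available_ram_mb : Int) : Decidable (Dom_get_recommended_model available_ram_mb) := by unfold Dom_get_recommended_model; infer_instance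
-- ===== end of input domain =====

-- B replaces A's sort-then-first-match over the model dict with a closed-form
-- descending threshold if-chain (simpler; no sort, no dict traversal).

-- ===== PORT A =====
-- Python 'Any' values of the model table: only ints and strings occur.
inductive PyAny
  | I : Int → PyAny
  | S : String → PyAny
deriving DecidableEq, Repr

-- int(x) where x is already an int (the only case the table reaches)
def pyAnyInt : PyAny → Int
  | .I n => n
  | .S _ => 0

def WHISPER_MODELS : PySem.Dict String (PySem.Dict String PyAny) :=
  PySem.Dict.ofList
    [ ("tiny", PySem.Dict.ofList
        [("name", .S "Tiny"), ("size_mb", .I 75), ("ram_required", .I 400),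
         ("description", .S "Fastest, lowest accuracy")])
    , ("base", PySem.Dict.ofList
        [("name", .S "Base"), ("size_mb", .I 142), ("ram_required", .I 500),
         ("description", .S "Good balance of speed and accuracy")])
    , ("small", PySem.Dict.ofList
        [("name", .S "Small"), ("size_mb", .I 466), ("ram_required", .I 1000),
         ("description", .S "Better accuracy, moderate speed")])
    , ("medium", PySem.Dict.ofList
        [("name", .S "Medium"), ("size_mb", .I 1500), ("ram_required", .I 2600),
         ("description", .S "High accuracy, slower")]) ]

-- A's 'for model_name, info in candidates: if fits: return model_name' loop
def firstFit (available_ram_mb : Int) : List (String × PySem.Dict String PyAny) → String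
  | [] => "tiny"
  | (model_name, info) :: rest =>
      if pyAnyInt (info.getD "ram_required" (.I 0)) ≤ available_ram_mb then model_name
      else firstFit available_ram_mb rest

def get_recommended_model (available_ram_mb : Int) : String :=
  let candidates :=
    PySem.List.sorted WHISPER_MODELS.items
      (fun item => pyAnyInt (item.2.getD "ram_required" (.I 0))) true
  firstFit available_ram_mb candidates

-- ===== PORT B =====
def get_recommended_model_alt (available_ram_mb : Int) : String :=
  if available_ram_mb ≥ 2600 then "medium"
  else if available_ram_mb ≥ 1000 then "small"
  else if available_ram_mb ≥ 500 then "base"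
  else "tiny"

-- ===== PRECONDITION & SPEC =====
def Spec_get_recommended_model (available_ram_mb : Int) (out : String) : Prop := out = get_recommended_model_alt available_ram_mb
instance (available_ram_mb : Int) (out : String) : Decidable (Spec_get_recommended_model available_ram_mb out) := by unfold Spec_get_recommended_model; infer_instance

-- ===== CLAIM (what is proved, stated in full; the proofs are below) =====
def Claim_equal_get_recommended_model : Prop := ∀ (available_ram_mb : Int), Dom_get_recommended_model available_ram_mb → Spec_get_recommended_model available_ram_mb (get_recommended_model available_ram_mb)

-- ===== LEMMAS AND PROOFS =====
def dTiny : PySem.Dict String PyAny := PySem.Dict.ofList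
  [("name", .S "Tiny"), ("size_mb", .I 75), ("ram_required", .I 400),
   ("description", .S "Fastest, lowest accuracy")]
def dBase : PySem.Dict String PyAny := PySem.Dict.ofList
  [("name", .S "Base"), ("size_mb", .I 142), ("ram_required", .I 500),
   ("description", .S "Good balance of speed and accuracy")]
def dSmall : PySem.Dict String PyAny := PySem.Dict.ofList
  [("name", .S "Small"), ("size_mb", .I 466), ("ram_required", .I 1000),
   ("description", .S "Better accuracy, moderate speed")]
def dMedium : PySem.Dict String PyAny := PySem.Dict.ofList
  [("name", .S "Medium"), ("size_mb", .I 1500), ("ram_required", .I 2600),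
   ("description", .S "High accuracy, slower")]

theorem sorted_items_eq :
    PySem.List.sorted WHISPER_MODELS.items
      (fun item => pyAnyInt (item.2.getD "ram_required" (.I 0))) true
    = [("medium", dMedium), ("small", dSmall), ("base", dBase), ("tiny", dTiny)] := by
  decide

theorem ram_tiny : dTiny.getD "ram_required" (.I 0) = .I 400 := by decide
theorem ram_base : dBase.getD "ram_required" (.I 0) = .I 500 := by decide
theorem ram_small : dSmall.getD "ram_required" (.I 0) = .I 1000 := by decide
theorem ram_medium : dMedium.getD "ram_required" (.I 0) = .I 2600 := by decide

-- ===== VERDICT (by name: the statement is the Claim_ definition above) =====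
theorem get_recommended_model_spec : Claim_equal_get_recommended_model := by
  intro r _
  unfold Spec_get_recommended_model get_recommended_model get_recommended_model_alt
  rw [sorted_items_eq]
  simp only [firstFit, ram_tiny, ram_base, ram_small, ram_medium, pyAnyInt]
  split_ifs <;> simp_all
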